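-- pv_equiv track=rewrite | github.com/Linaro/hcqc | command/metric/height/height999.py | cut_first_term
-- ===== SOURCE A (Python) =====
-- def cut_first_term(term_a_list):
--     first_p = True
--     first_a_list = []
--     second_a_list = []
--     for term in term_a_list:
--         (tag, item) = term
--         if tag == 'C':
--             first_p = False
--         elif first_p:
--             first_a_list.append(term)
--         else:
--             second_a_list.append(term)
--     return (first_a_list, second_a_list)
-- ===== SOURCE B (Python) =====
-- def cut_first_term(term_a_list):
--     tags = [tag for (tag, item) in term_a_list]
--     if 'C' not in tags:
--         return (list(term_a_list), [])
--     idx = tags.index('C')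
--     return (list(term_a_list[:idx]),
--             [t for t in term_a_list[idx + 1:] if t[0] != 'C'])
-- ===== Notes on version B (the rewrite author's own statement) =====
-- stated objective: alternative
-- what changed: Replaces A's single stateful loop (boolean flag and two accumulators) with locate-then-slice: find the first 'C' tag with index(), slice the prefix, and filter remaining 'C'-tagged terms from the suffix.
import Mathlib
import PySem

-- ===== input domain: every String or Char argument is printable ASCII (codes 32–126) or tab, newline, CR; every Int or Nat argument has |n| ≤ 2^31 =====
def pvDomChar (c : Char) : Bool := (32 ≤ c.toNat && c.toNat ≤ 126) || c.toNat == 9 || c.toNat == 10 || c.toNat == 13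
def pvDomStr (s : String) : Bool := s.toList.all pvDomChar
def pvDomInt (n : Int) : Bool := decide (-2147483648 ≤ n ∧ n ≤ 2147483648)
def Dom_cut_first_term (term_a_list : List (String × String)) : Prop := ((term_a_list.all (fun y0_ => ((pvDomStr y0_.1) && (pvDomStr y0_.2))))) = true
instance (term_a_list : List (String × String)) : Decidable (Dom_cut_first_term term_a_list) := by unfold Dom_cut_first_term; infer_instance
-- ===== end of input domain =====

-- B replaces A's single stateful loop (flag + two accumulators) with locate-then-slice:
-- find the first 'C' tag, slice the prefix, filter 'C'-tagged terms from the suffix (alternative decomposition, same cost).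


-- ===== PORT A =====
-- state = (first_p, first_a_list, second_a_list); loop body in the same branch order as A
def cutFirstTermStep (st : Bool × List (String × String) × List (String × String))
    (term : String × String) : Bool × List (String × String) × List (String × String) :=
  if term.1 == "C" then (false, st.2.1, st.2.2)
  else if st.1 then (st.1, st.2.1 ++ [term], st.2.2)
  else (st.1, st.2.1, st.2.2 ++ [term])

def cut_first_term (term_a_list : List (String × String)) : (List (String × String)) × (List (String × String)) :=
  let st := term_a_list.foldl cutFirstTermStep (true, [], [])
  (st.2.1, st.2.2)

-- ===== PORT B =====
-- tags = [tag for (tag, item) in term_a_list]; 'C' in tags; tags.index('C') (membership checked first, so idxOf is exact); slices and filter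
def cut_first_term_alt (term_a_list : List (String × String)) : (List (String × String)) × (List (String × String)) :=
  let tags := term_a_list.map (fun t => t.1)
  if tags.contains "C" then
    let idx := tags.idxOf "C"
    (term_a_list.take idx, (term_a_list.drop (idx + 1)).filter (fun t => t.1 != "C"))
  else (term_a_list, [])

-- ===== PRECONDITION & SPEC =====
def Spec_cut_first_term (term_a_list : List (String × String)) (out : (List (String × String)) × (List (String × String))) : Prop := out = cut_first_term_alt term_a_list
instance (term_a_list : List (String × String)) (out : (List (String × String)) × (List (String × String))) : Decidable (Spec_cut_first_term term_a_list out) := by unfold Spec_cut_first_term; infer_instance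

-- ===== CLAIM (what is proved, stated in full; the proofs are below) =====
def Claim_equal_cut_first_term : Prop := ∀ (term_a_list : List (String × String)), Dom_cut_first_term term_a_list → Spec_cut_first_term term_a_list (cut_first_term term_a_list)

-- ===== LEMMAS AND PROOFS =====

-- once the flag is false, the loop only appends non-'C' terms to the second list
theorem foldl_false (l : List (String × String)) (f0 s0 : List (String × String)) :
    l.foldl cutFirstTermStep (false, f0, s0)
      = (false, f0, s0 ++ l.filter (fun t => t.1 != "C")) := by
  induction l generalizing s0 with
  | nil => simp
  | cons t l ih =>
    by_cases h : t.1 = "C" <;>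
      simp [cutFirstTermStep, h, ih]

-- while the flag is true, the loop result is A's answer offset by the accumulators
theorem foldl_true (l : List (String × String)) (f0 s0 : List (String × String)) :
    l.foldl cutFirstTermStep (true, f0, s0)
      = if (l.map (fun t => t.1)).contains "C" then
          (false, f0 ++ l.take ((l.map (fun t => t.1)).idxOf "C"),
           s0 ++ (l.drop ((l.map (fun t => t.1)).idxOf "C" + 1)).filter (fun t => t.1 != "C"))
        else (true, f0 ++ l, s0) := by
  induction l generalizing f0 with
  | nil => simp
  | cons t l ih =>
    by_cases h : t.1 = "C"
    · simp [cutFirstTermStep, h, foldl_false]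
    · have h' : ¬ ((t.1 : String) = "C") := h
      simp only [List.foldl_cons, cutFirstTermStep, beq_iff_eq, h, if_false, if_true,
        List.map_cons, List.contains_cons, List.idxOf_cons, ih]
      have hb : (t.1 == "C") = false := by simp [h]
      have hb' : ("C" == t.1) = false := by
        simp only [beq_eq_false_iff_ne]; exact fun e => h e.symm
      rw [hb', Bool.false_or]
      simp [hb, List.take_succ_cons, List.drop_succ_cons]

-- ===== VERDICT (by name: the statement is the Claim_ definition above) =====
theorem cut_first_term_spec : Claim_equal_cut_first_term := by
  intro l _
  unfold Spec_cut_first_term cut_first_term cut_first_term_alt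
  simp only [foldl_true]
  split <;> rfl
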